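-- pv_equiv track=rewrite | github.com/YoelShoshan/tiny_openfold | tiny_openfold/data/mmcif_parsing.py | mmcif_loop_to_list
-- ===== SOURCE A (Python) =====
-- from typing import Any, Mapping, Optional, Sequence, Tuple, Dict, List
--
-- MmCIFDict = Mapping[str, Sequence[str]]
--
-- def mmcif_loop_to_list(
--     prefix: str, parsed_info: MmCIFDict
-- ) -> Sequence[Mapping[str, str]]:
--     """Extracts loop associated with a prefix from mmCIF data as a list.
--
--     Reference for loop_ in mmCIF:
--       http://mmcif.wwpdb.org/docs/tutorials/mechanics/pdbx-mmcif-syntax.html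
--
--     Args:
--       prefix: Prefix shared by each of the data items in the loop.
--         e.g. '_entity_poly_seq.', where the data items are _entity_poly_seq.num,
--         _entity_poly_seq.mon_id. Should include the trailing period.
--       parsed_info: A dict of parsed mmCIF data, e.g. _mmcif_dict from a Biopython
--         parser.
--
--     Returns:
--       Returns a list of dicts; each dict represents 1 entry from an mmCIF loop.
--     """
--     cols = []
--     data = []
--     for key, value in parsed_info.items():
--         if key.startswith(prefix):
--             cols.append(key)
--             data.append(value)
--
--     assert all([len(xs) == len(data[0]) for xs in data]), (
--         "mmCIF error: Not all loops are the same length: %s" % cols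
--     )
--
--     return [dict(zip(cols, xs)) for xs in zip(*data)]
-- ===== SOURCE B (Python) =====
-- def mmcif_loop_to_list(prefix, parsed_info):
--     """Single-pass re-implementation: grow the list of row dicts column by
--     column while scanning parsed_info once; no cols/data staging, no
--     zip(*data) transpose."""
--     rows = None
--     for key, value in parsed_info.items():
--         if key.startswith(prefix):
--             if rows is None:
--                 rows = [{key: v} for v in value]
--             else:
--                 assert len(value) == len(rows), (
--                     "mmCIF error: Not all loops are the same length: %s" % key)
--                 for row, v in zip(rows, value):
--                     row[key] = v
--     return rows if rows is not None else []
-- ===== Notes on version B (the rewrite author's own statement) =====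
-- stated objective: alternative
-- what changed: B makes one pass over parsed_info, growing the list of row dicts in place column by column (each matching column's values are merged into the existing rows), instead of A's two-stage collect cols/data then zip(*data) transpose.
import Mathlib
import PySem

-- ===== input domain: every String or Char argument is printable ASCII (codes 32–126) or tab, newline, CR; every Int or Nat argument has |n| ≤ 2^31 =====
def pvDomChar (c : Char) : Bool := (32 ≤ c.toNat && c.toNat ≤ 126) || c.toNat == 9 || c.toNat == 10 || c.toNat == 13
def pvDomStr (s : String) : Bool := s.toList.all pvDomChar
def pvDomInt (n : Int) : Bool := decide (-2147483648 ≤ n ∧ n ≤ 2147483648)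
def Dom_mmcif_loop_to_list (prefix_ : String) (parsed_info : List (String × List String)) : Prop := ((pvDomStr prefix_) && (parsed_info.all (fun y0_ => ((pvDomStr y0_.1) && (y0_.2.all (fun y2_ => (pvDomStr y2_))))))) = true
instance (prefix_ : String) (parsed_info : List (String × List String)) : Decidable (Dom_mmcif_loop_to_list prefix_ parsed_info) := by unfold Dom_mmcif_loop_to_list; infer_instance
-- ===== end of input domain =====

-- B builds the row dicts in one pass, merging each matching column into the rows as it is met;
-- A stages parallel cols/data lists and transposes them with zip(*data).

-- ===== PORT A =====
-- zip(*data): repeatedly take the heads until some list is exhausted (Python zip truncates at the shortest)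
def pvZipStar : List (List String) → List (List String)
  | [] => []
  | l :: ls =>
    if l.isEmpty || ls.any List.isEmpty then []
    else (l.headD "" :: ls.map (fun m => m.headD "")) :: pvZipStar (l.tail :: ls.map List.tail)
termination_by d => (d.headD []).length
decreasing_by
  simp_all [List.isEmpty_iff]
  cases l <;> simp_all

def mmcif_loop_to_list (prefix_ : String) (parsed_info : List (String × List String)) : List (List (String × String)) :=
  -- for key, value in parsed_info.items(): if key.startswith(prefix): cols.append(key); data.append(value)
  let cd := parsed_info.foldl
    (fun (acc : List String × List (List String)) kv =>
      if PySem.Str.startswith kv.1 prefix_ then (acc.1 ++ [kv.1], acc.2 ++ [kv.2]) else acc)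
    ([], [])
  -- the assert raises AssertionError on unequal column lengths: those inputs are outside Pre_
  -- return [dict(zip(cols, xs)) for xs in zip(*data)]
  (pvZipStar cd.2).map (fun xs =>
    ((cd.1.zip xs).foldl (fun (d : PySem.Dict String String) p => d.insert p.1 p.2) PySem.Dict.empty).items)

-- ===== PORT B =====
-- rows = [{key: v} for v in value]  (the first matching column)
def pvInitRows (kv : String × List String) : List (PySem.Dict String String) :=
  kv.2.map (fun v => (PySem.Dict.empty : PySem.Dict String String).insert kv.1 v)

-- for row, v in zip(rows, value): row[key] = v  (merge a later column into the rows)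
def pvMergeCol (rs : List (PySem.Dict String String)) (kv : String × List String) : List (PySem.Dict String String) :=
  (rs.zip kv.2).map (fun p => p.1.insert kv.1 p.2)

def mmcif_loop_to_list_alt (prefix_ : String) (parsed_info : List (String × List String)) : List (List (String × String)) :=
  -- rows = None; for key, value in parsed_info.items(): if key.startswith(prefix): …
  let rows := parsed_info.foldl
    (fun (acc : Option (List (PySem.Dict String String))) kv =>
      if PySem.Str.startswith kv.1 prefix_ then
        some (match acc with
          | none => pvInitRows kv          -- rows is None: seed one dict per value
          | some rs => pvMergeCol rs kv)   -- B's assert raises on unequal lengths: outside Pre_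
      else acc) none
  -- return rows if rows is not None else []
  (rows.getD []).map PySem.Dict.items

-- ===== PRECONDITION & SPEC =====
-- Pre_ excludes unequal matching-column lengths, where both A's and B's asserts raise AssertionError.
def Pre_mmcif_loop_to_list (prefix_ : String) (parsed_info : List (String × List String)) : Prop :=
  let F := parsed_info.filter (fun kv => PySem.Str.startswith kv.1 prefix_)
  ∀ kv ∈ F, kv.2.length = (F.headD ("", [])).2.length
instance (prefix_ : String) (parsed_info : List (String × List String)) : Decidable (Pre_mmcif_loop_to_list prefix_ parsed_info) := by unfold Pre_mmcif_loop_to_list; infer_instance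

def pvWitness_mmcif_loop_to_list : String × (List (String × List String)) :=
  ("_a.", [("_a.x", ["1", "2"]), ("_a.y", ["3", "4"]), ("b", ["9"])])

def Spec_mmcif_loop_to_list (prefix_ : String) (parsed_info : List (String × List String)) (out : List (List (String × String))) : Prop := out = mmcif_loop_to_list_alt prefix_ parsed_info
instance (prefix_ : String) (parsed_info : List (String × List String)) (out : List (List (String × String))) : Decidable (Spec_mmcif_loop_to_list prefix_ parsed_info out) := by unfold Spec_mmcif_loop_to_list; infer_instance

-- ===== CLAIM (what is proved, stated in full; the proofs are below) =====
def Claim_equal_mmcif_loop_to_list : Prop := ∀ (prefix_ : String) (parsed_info : List (String × List String)), Dom_mmcif_loop_to_list prefix_ parsed_info → Pre_mmcif_loop_to_list prefix_ parsed_info → Spec_mmcif_loop_to_list prefix_ parsed_info (mmcif_loop_to_list prefix_ parsed_info)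

-- ===== LEMMAS AND PROOFS =====

-- A's accumulator loop componentwise: cols = keys of the filtered entries, data = their values
lemma foldA_char (prefix_ : String) (xs : List (String × List String))
    (acc : List String × List (List String)) :
    xs.foldl
      (fun (acc : List String × List (List String)) kv =>
        if PySem.Str.startswith kv.1 prefix_ then (acc.1 ++ [kv.1], acc.2 ++ [kv.2]) else acc)
      acc
    = (acc.1 ++ (xs.filter (fun kv => PySem.Str.startswith kv.1 prefix_)).map Prod.fst,
       acc.2 ++ (xs.filter (fun kv => PySem.Str.startswith kv.1 prefix_)).map Prod.snd) := by
  induction xs generalizing acc with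
  | nil => simp
  | cons kv t ih =>
    simp only [List.foldl_cons, List.filter_cons]
    by_cases h : PySem.Str.startswith kv.1 prefix_ = true
    · simp only [if_pos h, ih]; simp
    · simp only [if_neg h, ih]

-- zip(*data) when every list has length n: the i-th tuple is the i-th element of each list
lemma zipStar_char (n : Nat) :
    ∀ (data : List (List String)), data ≠ [] → (∀ l ∈ data, l.length = n) →
    pvZipStar data = (List.range n).map (fun i => data.map (fun l => l.getD i "")) := by
  induction n with
  | zero =>
    intro data hne hlen
    match data with
    | [] => simp at hne
    | l :: ls =>
      have : l.isEmpty := by simp [List.length_eq_zero_iff.mp (hlen l (by simp))]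
      simp [pvZipStar, this]
  | succ n ih =>
    intro data hne hlen
    match data with
    | [] => simp at hne
    | l :: ls =>
      have hlne : ∀ m ∈ l :: ls, m ≠ [] := by
        intro m hm h
        have := hlen m hm; simp [h] at this
      have h1 : l.isEmpty = false := by simp; exact hlne l (by simp)
      have h2 : ls.any List.isEmpty = false := by
        simp only [List.any_eq_false]
        intro m hm; simp [List.isEmpty_iff]; exact hlne m (by simp [hm])
      rw [pvZipStar, if_neg (by simp [h1, h2])]
      have htl : pvZipStar (l.tail :: ls.map List.tail)
          = (List.range n).map (fun i => (l.tail :: ls.map List.tail).map (fun m => m.getD i "")) := by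
        apply ih _ (by simp)
        intro m hm
        rcases List.mem_cons.mp hm with h | h
        · have := hlen l (by simp); subst h; simp [List.length_tail, this]
        · rcases List.mem_map.mp h with ⟨m', hm', rfl⟩
          have := hlen m' (by simp [hm']); simp [List.length_tail, this]
      rw [htl, List.range_succ_eq_map]
      simp only [List.map_cons, List.map_map]
      congr 1
      · have hd : ∀ m, m ∈ l :: ls → m.headD "" = m.getD 0 "" := by
          intro m hm
          match m, hlne m hm with
          | a :: t, _ => rfl
        congr 1
        · exact hd l (by simp)
        · exact List.map_congr_left (fun m hm => hd m (by simp [hm]))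
      · apply List.map_congr_left
        intro i _
        simp only [Function.comp]
        congr 1
        · match l, hlne l (by simp) with
          | a :: t, _ => simp
        · apply List.map_congr_left
          intro m hm
          match m, hlne m (by simp [hm]) with
          | a :: t, _ => simp

-- once B's accumulator is 'some rs', the fold is a plain foldl of pvMergeCol over the filtered tail
lemma foldB_some (prefix_ : String) :
    ∀ (xs : List (String × List String)) (rs : List (PySem.Dict String String)),
    xs.foldl
      (fun (acc : Option (List (PySem.Dict String String))) kv =>
        if PySem.Str.startswith kv.1 prefix_ then
          some (match acc with | none => pvInitRows kv | some rs => pvMergeCol rs kv)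
        else acc) (some rs)
    = some ((xs.filter (fun kv => PySem.Str.startswith kv.1 prefix_)).foldl pvMergeCol rs) := by
  intro xs
  induction xs with
  | nil => intro rs; simp
  | cons kv t ih =>
    intro rs
    simp only [List.foldl_cons, List.filter_cons]
    by_cases h : PySem.Str.startswith kv.1 prefix_ = true
    · simp only [if_pos h, ih, List.foldl_cons]
    · simp only [PySem.Str.startswith_eq] at h ih ⊢
      simp [h, ih]

-- from 'none', the fold seeds the rows at the first matching column and then merges the rest
lemma foldB_none (prefix_ : String) :
    ∀ (xs : List (String × List String)),
    xs.foldl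
      (fun (acc : Option (List (PySem.Dict String String))) kv =>
        if PySem.Str.startswith kv.1 prefix_ then
          some (match acc with | none => pvInitRows kv | some rs => pvMergeCol rs kv)
        else acc) none
    = match xs.filter (fun kv => PySem.Str.startswith kv.1 prefix_) with
      | [] => none
      | kv0 :: Ft => some (Ft.foldl pvMergeCol (pvInitRows kv0)) := by
  intro xs
  induction xs with
  | nil => simp
  | cons kv t ih =>
    simp only [List.foldl_cons, List.filter_cons]
    by_cases h : PySem.Str.startswith kv.1 prefix_ = true
    · simp only [h, if_pos]
      rw [foldB_some]
    · simp only [PySem.Str.startswith_eq] at h ih ⊢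
      simp [h, ih]

-- merging columns of uniform length n acts elementwise: row i folds the per-row inserts
lemma foldl_merge_eq (n : Nat) :
    ∀ (F : List (String × List String)) (rs : List (PySem.Dict String String)),
    rs.length = n → (∀ kv ∈ F, kv.2.length = n) →
    F.foldl pvMergeCol rs
      = (List.range n).map (fun i =>
          F.foldl (fun (d : PySem.Dict String String) kv => d.insert kv.1 (kv.2.getD i "")) (rs.getD i PySem.Dict.empty)) := by
  intro F
  induction F with
  | nil =>
    intro rs hlen _
    simp only [List.foldl_nil]
    apply List.ext_getElem (by simp [hlen])
    intro i hi hi'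
    simp only [List.getElem_map, List.getElem_range]
    rw [List.getD_eq_getElem _ _ (by omega)]
  | cons kv F' ih =>
    intro rs hlen hF
    have hkv : kv.2.length = n := hF kv (by simp)
    have hmlen : (pvMergeCol rs kv).length = n := by
      simp [pvMergeCol, hlen, hkv]
    simp only [List.foldl_cons]
    rw [ih (pvMergeCol rs kv) hmlen (fun kv' h => hF kv' (by simp [h]))]
    apply List.map_congr_left
    intro i hi
    have hi' : i < n := List.mem_range.mp hi
    have hget : (pvMergeCol rs kv).getD i PySem.Dict.empty
        = (rs.getD i PySem.Dict.empty).insert kv.1 (kv.2.getD i "") := by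
      rw [List.getD_eq_getElem _ _ (by omega)]
      simp only [pvMergeCol, List.getElem_map, List.getElem_zip]
      rw [List.getD_eq_getElem _ _ (by omega), List.getD_eq_getElem _ _ (by omega)]
    rw [hget]

-- ===== VERDICT (by name: the statement is the Claim_ definition above) =====
theorem mmcif_loop_to_list_spec : Claim_equal_mmcif_loop_to_list := by
  intro prefix_ parsed_info _ hpre
  unfold Pre_mmcif_loop_to_list at hpre
  unfold Spec_mmcif_loop_to_list mmcif_loop_to_list mmcif_loop_to_list_alt
  rw [foldA_char, foldB_none]
  simp only [List.nil_append]
  rcases hFe : parsed_info.filter (fun kv => PySem.Str.startswith kv.1 prefix_) with _ | ⟨kv0, Ft⟩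
  · rw [hFe]; simp [pvZipStar]
  · rw [hFe] at hpre ⊢
    simp only [List.headD_cons] at hpre
    dsimp only [Option.getD_some]
    -- A's transpose with every column of length kv0.2.length
    have hz : pvZipStar ((kv0 :: Ft).map Prod.snd)
        = (List.range kv0.2.length).map (fun i => ((kv0 :: Ft).map Prod.snd).map (fun l => l.getD i "")) := by
      apply zipStar_char kv0.2.length _ (by simp)
      intro l hl
      rcases List.mem_map.mp hl with ⟨kv, hkv, rfl⟩
      exact hpre kv hkv
    rw [hz, List.map_map]
    -- B's incremental rows, elementwise
    have hinit : (pvInitRows kv0).length = kv0.2.length := by simp [pvInitRows]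
    rw [foldl_merge_eq kv0.2.length Ft (pvInitRows kv0) hinit (fun kv h => hpre kv (by simp [h]))]
    rw [List.map_map]
    apply List.map_congr_left
    intro i hi
    have hi' : i < kv0.2.length := List.mem_range.mp hi
    simp only [Function.comp]
    -- both rows are the same insert fold over the filtered entries
    have hzip : ((kv0 :: Ft).map Prod.fst).zip (((kv0 :: Ft).map Prod.snd).map (fun l => l.getD i ""))
        = (kv0 :: Ft).map (fun kv => (kv.1, kv.2.getD i "")) := by
      rw [List.map_map]
      exact List.zip_map'
    rw [hzip, List.foldl_map]
    have hrow0 : (pvInitRows kv0).getD i PySem.Dict.empty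
        = (PySem.Dict.empty : PySem.Dict String String).insert kv0.1 (kv0.2.getD i "") := by
      rw [List.getD_eq_getElem _ _ (by simp [pvInitRows]; omega)]
      simp only [pvInitRows, List.getElem_map]
      rw [List.getD_eq_getElem _ _ (by omega)]
    rw [hrow0]
    rfl
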